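-- pv_equiv track=rewrite | github.com/SKN19-Final-1team/backend | app/rag/postprocess/consult_hints.py | _lookup_tag_rules
-- ===== SOURCE A (Python) =====
-- from typing import Any, Dict, List, Optional, Tuple
--
-- def _merge_hints(
--     base: Dict[str, List[str]],
--     add_steps: List[str],
--     add_questions: List[str],
--     max_steps: int,
--     max_qs: int,
-- ) -> Dict[str, List[str]]:
--     flow_steps = list(base.get("flow_steps") or [])
--     questions = list(base.get("common_questions") or [])
--     for step in add_steps:
--         if step and step not in flow_steps and len(flow_steps) < max_steps:
--             flow_steps.append(step)
--     for q in add_questions: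
--         if q and q not in questions and len(questions) < max_qs:
--             questions.append(q)
--     return {"flow_steps": flow_steps, "common_questions": questions}
--
-- def _lookup_tag_rules(tags: List[str], rules: Dict[str, Any], max_steps: int, max_qs: int) -> Dict[str, List[str]]:
--     tag_rules = rules.get("scenario_tags") or {}
--     hints: Dict[str, List[str]] = {"flow_steps": [], "common_questions": []}
--     for tag in tags:
--         payload = tag_rules.get(tag)
--         if not isinstance(payload, dict):
--             continue
--         steps = payload.get("flow_steps") or []
--         questions = payload.get("common_questions") or []
--         hints = _merge_hints(hints, steps, questions, max_steps, max_qs)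
--     return hints
-- ===== SOURCE B (Python) =====
-- from typing import Any, Dict, List
--
--
-- def _cap_dedup(items: List[str], limit: int) -> List[str]:
--     out: List[str] = []
--     seen = set()
--     for it in items:
--         if it and it not in seen and len(out) < limit:
--             out.append(it)
--             seen.add(it)
--     return out
--
--
-- def _lookup_tag_rules(tags: List[str], rules: Dict[str, Any], max_steps: int, max_qs: int) -> Dict[str, List[str]]:
--     tag_rules = rules.get("scenario_tags") or {}
--     all_steps: List[str] = []
--     all_qs: List[str] = []
--     for tag in tags:
--         payload = tag_rules.get(tag)
--         if isinstance(payload, dict):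
--             all_steps.extend(payload.get("flow_steps") or [])
--             all_qs.extend(payload.get("common_questions") or [])
--     return {
--         "flow_steps": _cap_dedup(all_steps, max_steps),
--         "common_questions": _cap_dedup(all_qs, max_qs),
--     }
-- ===== Notes on version B (the rewrite author's own statement) =====
-- stated objective: simpler
-- what changed: Replaced the per-tag _merge_hints accumulator/copy with a collect-then-dedup structure: one pass gathers all raw steps/questions into two flat lists, then a single capped dedup pass with a seen-set builds each output list.
import Mathlib
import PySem

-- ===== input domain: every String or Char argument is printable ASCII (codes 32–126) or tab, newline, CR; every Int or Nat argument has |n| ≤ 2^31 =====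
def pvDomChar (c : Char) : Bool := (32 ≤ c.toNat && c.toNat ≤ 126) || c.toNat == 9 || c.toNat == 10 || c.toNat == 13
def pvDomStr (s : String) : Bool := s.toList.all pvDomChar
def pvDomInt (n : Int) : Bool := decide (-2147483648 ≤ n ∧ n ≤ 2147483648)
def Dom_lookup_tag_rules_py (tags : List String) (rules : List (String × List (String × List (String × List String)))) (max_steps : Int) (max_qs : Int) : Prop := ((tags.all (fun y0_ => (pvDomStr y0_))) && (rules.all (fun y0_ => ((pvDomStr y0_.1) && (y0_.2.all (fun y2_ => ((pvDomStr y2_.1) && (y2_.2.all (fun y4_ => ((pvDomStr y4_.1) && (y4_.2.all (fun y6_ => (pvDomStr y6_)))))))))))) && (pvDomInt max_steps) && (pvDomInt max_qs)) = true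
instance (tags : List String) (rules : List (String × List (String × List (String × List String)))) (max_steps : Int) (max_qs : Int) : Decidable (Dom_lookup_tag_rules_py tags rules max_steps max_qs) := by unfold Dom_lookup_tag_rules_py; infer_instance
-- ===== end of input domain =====

-- B replaces A's per-tag _merge_hints accumulator with a collect-then-dedup structure (objective: simpler; same cost).

-- ===== PORT A =====
-- dict.get on the assoc-list representation (first match), shared first-match lookup
def pvGetA {α : Type} (d : List (String × α)) (k : String) : Option α :=
  match d with
  | [] => none
  | (k', v) :: rest => if k' == k then some v else pvGetA rest k

-- one 'for ... if cond: append' loop of _merge_hints (membership tested on the output list itself)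
def pvMergeLoopA (init : List String) (items : List String) (cap : Int) : List String :=
  items.foldl (fun fs s => if s ≠ "" ∧ s ∉ fs ∧ (fs.length : Int) < cap then fs ++ [s] else fs) init

-- _merge_hints; 'base.get(k) or []' = getD [] (an empty list is falsy and 'or' yields [] = that same value)
def pvMergeHintsA (base : List (String × List String)) (add_steps add_questions : List String)
    (max_steps max_qs : Int) : List (String × List String) :=
  let flow_steps := (pvGetA base "flow_steps").getD []
  let questions := (pvGetA base "common_questions").getD []
  [("flow_steps", pvMergeLoopA flow_steps add_steps max_steps),
   ("common_questions", pvMergeLoopA questions add_questions max_qs)]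

-- _lookup_tag_rules; under the typed domain every present payload is a dict, so the
-- 'not isinstance(payload, dict)' continue fires exactly when the lookup is None.
def lookup_tag_rules_py (tags : List String) (rules : List (String × List (String × List (String × List String)))) (max_steps : Int) (max_qs : Int) : List (String × List String) :=
  let tag_rules := (pvGetA rules "scenario_tags").getD []
  tags.foldl (fun hints tag =>
    match pvGetA tag_rules tag with
    | none => hints
    | some payload =>
        pvMergeHintsA hints ((pvGetA payload "flow_steps").getD [])
          ((pvGetA payload "common_questions").getD []) max_steps max_qs)
    [("flow_steps", []), ("common_questions", [])]

-- ===== PORT B =====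
def pvGetB {α : Type} (d : List (String × α)) (k : String) : Option α :=
  match d with
  | [] => none
  | (k', v) :: rest => if k' == k then some v else pvGetB rest k

-- _cap_dedup: one pass maintaining (out, seen)
def pvCapDedupB (items : List String) (limit : Int) : List String :=
  (items.foldl (fun (st : List String × PySem.Set String) it =>
      if it ≠ "" ∧ PySem.Set.contains st.2 it = false ∧ ((st.1.length : Int) < limit)
      then (st.1 ++ [it], PySem.Set.add st.2 it) else st)
    ([], PySem.Set.empty)).1

def lookup_tag_rules_py_alt (tags : List String) (rules : List (String × List (String × List (String × List String)))) (max_steps : Int) (max_qs : Int) : List (String × List String) :=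
  let tag_rules := (pvGetB rules "scenario_tags").getD []
  let collected := tags.foldl (fun (acc : List String × List String) tag =>
      match pvGetB tag_rules tag with
      | none => acc
      | some payload =>
          (acc.1 ++ (pvGetB payload "flow_steps").getD [],
           acc.2 ++ (pvGetB payload "common_questions").getD [])) ([], [])
  [("flow_steps", pvCapDedupB collected.1 max_steps),
   ("common_questions", pvCapDedupB collected.2 max_qs)]

-- ===== PRECONDITION & SPEC =====
def Spec_lookup_tag_rules_py (tags : List String) (rules : List (String × List (String × List (String × List String)))) (max_steps : Int) (max_qs : Int) (out : List (String × List String)) : Prop := out = lookup_tag_rules_py_alt tags rules max_steps max_qs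
instance (tags : List String) (rules : List (String × List (String × List (String × List String)))) (max_steps : Int) (max_qs : Int) (out : List (String × List String)) : Decidable (Spec_lookup_tag_rules_py tags rules max_steps max_qs out) := by unfold Spec_lookup_tag_rules_py; infer_instance

-- ===== CLAIM (what is proved, stated in full; the proofs are below) =====
def Claim_equal_lookup_tag_rules_py : Prop := ∀ (tags : List String) (rules : List (String × List (String × List (String × List String)))) (max_steps : Int) (max_qs : Int), Dom_lookup_tag_rules_py tags rules max_steps max_qs → Spec_lookup_tag_rules_py tags rules max_steps max_qs (lookup_tag_rules_py tags rules max_steps max_qs)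

-- ===== LEMMAS AND PROOFS =====

theorem pvGetB_eq_pvGetA {α : Type} (d : List (String × α)) (k : String) :
    pvGetB d k = pvGetA d k := by
  induction d with
  | nil => rfl
  | cons p rest ih => simp [pvGetA, pvGetB, ih]

-- B's fold with a seen-set equals A's fold with list membership, under the invariant
-- that 'seen' holds exactly the members of 'out'.
theorem capFold_eq_mergeLoop (items : List String) (out : List String)
    (seen : PySem.Set String) (limit : Int)
    (h : ∀ x, x ∈ seen ↔ x ∈ out) :
    (items.foldl (fun (st : List String × PySem.Set String) it =>
        if it ≠ "" ∧ PySem.Set.contains st.2 it = false ∧ ((st.1.length : Int) < limit)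
        then (st.1 ++ [it], PySem.Set.add st.2 it) else st) (out, seen)).1
      = pvMergeLoopA out items limit := by
  induction items generalizing out seen with
  | nil => simp [pvMergeLoopA]
  | cons it rest ih =>
    simp only [pvMergeLoopA, List.foldl_cons] at *
    by_cases hc : it ≠ "" ∧ it ∉ out ∧ ((out.length : Int) < limit)
    · have hs : PySem.Set.contains seen it = false := by
        rw [Bool.eq_false_iff]
        intro ht
        exact hc.2.1 ((h it).mp ((PySem.Set.contains_iff _ _).mp ht))
      rw [if_pos ⟨hc.1, hs, hc.2.2⟩, if_pos hc]
      exact ih _ _ (fun x => by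
        rw [PySem.Set.mem_add, h x]
        simp)
    · have hn : ¬ (it ≠ "" ∧ PySem.Set.contains seen it = false ∧ ((out.length : Int) < limit)) := by
        rintro ⟨h1, h2, h3⟩
        refine hc ⟨h1, fun hm => ?_, h3⟩
        rw [(PySem.Set.contains_iff _ _).mpr ((h it).mpr hm)] at h2
        exact absurd h2 (by decide)
      rw [if_neg hn, if_neg hc]
      exact ih _ _ h

theorem capDedup_eq_mergeLoop (items : List String) (limit : Int) :
    pvCapDedupB items limit = pvMergeLoopA [] items limit := by
  unfold pvCapDedupB
  exact capFold_eq_mergeLoop items [] PySem.Set.empty limit (fun x => Iff.rfl)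

-- A's fold over tags, started from an arbitrary pair of accumulated lists, merges exactly
-- the collected concatenations (B's collect phase shifted by those initial accumulators).
theorem mainFold (tr : List (String × List (String × List String)))
    (max_steps max_qs : Int) (tags : List String) (fs qs : List String) :
    tags.foldl (fun hints tag =>
      match pvGetA tr tag with
      | none => hints
      | some payload =>
          pvMergeHintsA hints ((pvGetA payload "flow_steps").getD [])
            ((pvGetA payload "common_questions").getD []) max_steps max_qs)
      [("flow_steps", fs), ("common_questions", qs)]
    = [("flow_steps", pvMergeLoopA fs
          (tags.foldl (fun (acc : List String × List String) tag =>
            match pvGetA tr tag with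
            | none => acc
            | some payload =>
                (acc.1 ++ (pvGetA payload "flow_steps").getD [],
                 acc.2 ++ (pvGetA payload "common_questions").getD [])) ([], [])).1 max_steps),
       ("common_questions", pvMergeLoopA qs
          (tags.foldl (fun (acc : List String × List String) tag =>
            match pvGetA tr tag with
            | none => acc
            | some payload =>
                (acc.1 ++ (pvGetA payload "flow_steps").getD [],
                 acc.2 ++ (pvGetA payload "common_questions").getD [])) ([], [])).2 max_qs)] := by
  induction tags generalizing fs qs with
  | nil => simp [pvMergeLoopA]
  | cons t rest ih =>
    simp only [List.foldl_cons]
    cases hp : pvGetA tr t with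
    | none => exact ih fs qs
    | some payload =>
      -- shift the collect accumulator: foldl from (s, q) = (s ++ ·, q ++ ·) of foldl from ([], [])
      have shift : ∀ (l : List String) (s q : List String),
          l.foldl (fun (acc : List String × List String) tag =>
            match pvGetA tr tag with
            | none => acc
            | some payload =>
                (acc.1 ++ (pvGetA payload "flow_steps").getD [],
                 acc.2 ++ (pvGetA payload "common_questions").getD [])) (s, q)
          = (s ++ (l.foldl (fun (acc : List String × List String) tag =>
              match pvGetA tr tag with
              | none => acc
              | some payload =>
                  (acc.1 ++ (pvGetA payload "flow_steps").getD [],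
                   acc.2 ++ (pvGetA payload "common_questions").getD [])) ([], [])).1,
             q ++ (l.foldl (fun (acc : List String × List String) tag =>
              match pvGetA tr tag with
              | none => acc
              | some payload =>
                  (acc.1 ++ (pvGetA payload "flow_steps").getD [],
                   acc.2 ++ (pvGetA payload "common_questions").getD [])) ([], [])).2) := by
        intro l
        induction l with
        | nil => simp
        | cons u us ihu =>
          intro s q
          simp only [List.foldl_cons]
          cases hu : pvGetA tr u with
          | none => exact ihu s q
          | some pl =>
            dsimp only
            simp only [List.nil_append]
            rw [ihu (s ++ (pvGetA pl "flow_steps").getD []) (q ++ (pvGetA pl "common_questions").getD []),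
              ihu ((pvGetA pl "flow_steps").getD []) ((pvGetA pl "common_questions").getD [])]
            simp [List.append_assoc]
      dsimp only
      simp only [List.nil_append]
      have hm : pvMergeHintsA [("flow_steps", fs), ("common_questions", qs)]
          ((pvGetA payload "flow_steps").getD []) ((pvGetA payload "common_questions").getD [])
          max_steps max_qs
        = [("flow_steps", pvMergeLoopA fs ((pvGetA payload "flow_steps").getD []) max_steps),
           ("common_questions", pvMergeLoopA qs ((pvGetA payload "common_questions").getD []) max_qs)] := rfl
      rw [hm, ih,
        shift rest ((pvGetA payload "flow_steps").getD []) ((pvGetA payload "common_questions").getD [])]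
      simp [pvMergeLoopA, List.foldl_append]

-- ===== VERDICT (by name: the statement is the Claim_ definition above) =====
theorem lookup_tag_rules_py_spec : Claim_equal_lookup_tag_rules_py := by
  intro tags rules max_steps max_qs _
  unfold Spec_lookup_tag_rules_py lookup_tag_rules_py lookup_tag_rules_py_alt
  simp only [pvGetB_eq_pvGetA, capDedup_eq_mergeLoop]
  rw [mainFold]
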